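-- pv_equiv track=rewrite | github.com/PYNQcast/ServerSide_PYNQ_Raycaster | ref_files/drivers/mapDriver.py | _encode_map
-- ===== SOURCE A (Python) =====
-- def _encode_map(grid):
--     words = []
--     for row in grid:
--         word = 0
--         for col, tile in enumerate(row):
--             if tile:
--                 word |= (1 << col)
--         words.append(word)
--     return words
-- ===== SOURCE B (Python) =====
-- def _enc(row):
--     n = len(row)
--     if n <= 1:
--         return 0 if not row else (1 if row[0] else 0)
--     mid = n // 2
--     return _enc(row[:mid]) + (_enc(row[mid:]) << mid)
--
-- def _encode_map(grid):
--     return [_enc(row) for row in grid]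
-- ===== Notes on version B (the rewrite author's own statement) =====
-- stated objective: alternative
-- what changed: B encodes each row by divide-and-conquer recursion (split the row in half, encode each half, combine as left + (right << mid)) instead of A's linear enumerate loop ORing a positional mask per truthy tile.
import Mathlib
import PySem

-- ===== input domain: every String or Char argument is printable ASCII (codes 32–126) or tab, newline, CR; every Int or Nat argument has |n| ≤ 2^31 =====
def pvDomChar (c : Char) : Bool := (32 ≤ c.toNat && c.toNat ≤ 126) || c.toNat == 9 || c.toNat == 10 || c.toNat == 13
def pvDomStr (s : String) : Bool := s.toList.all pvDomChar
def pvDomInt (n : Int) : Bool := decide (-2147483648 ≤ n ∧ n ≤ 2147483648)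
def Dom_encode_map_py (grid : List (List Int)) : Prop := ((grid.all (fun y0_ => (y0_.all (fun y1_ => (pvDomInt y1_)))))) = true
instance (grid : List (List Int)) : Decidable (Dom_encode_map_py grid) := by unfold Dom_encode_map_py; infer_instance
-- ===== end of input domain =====

-- B encodes each row by divide-and-conquer recursion (split in half, combine as left + (right << mid))
-- instead of A's linear enumerate loop ORing a positional mask per truthy tile; objective: alternative.

-- ===== PORT A =====
def encode_map_py (grid : List (List Int)) : List Int :=
  grid.foldl (fun words row =>
    words ++ [(PySem.List.enumerate row 0).foldl
      (fun (word : Int) (p : Int × Int) =>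
        if p.2 ≠ 0 then PySem.Int.bor word ((1 : Int) <<< p.1.toNat) else word) 0]) []

-- ===== PORT B =====
def pvEnc (row : List Int) : Int :=
  if _h : row.length ≤ 1 then
    match row with
    | [] => 0
    | t :: _ => if t ≠ 0 then 1 else 0
  else
    let mid := row.length / 2
    pvEnc (row.take mid) + pvEnc (row.drop mid) <<< mid
termination_by row.length
decreasing_by
  · simp only [List.length_take]; omega
  · simp only [List.length_drop]; omega

def encode_map_py_alt (grid : List (List Int)) : List Int :=
  grid.map pvEnc

-- ===== PRECONDITION & SPEC =====
def Spec_encode_map_py (grid : List (List Int)) (out : List Int) : Prop := out = encode_map_py_alt grid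
instance (grid : List (List Int)) (out : List Int) : Decidable (Spec_encode_map_py grid out) := by unfold Spec_encode_map_py; infer_instance

-- ===== CLAIM (what is proved, stated in full; the proofs are below) =====
def Claim_equal_encode_map_py : Prop := ∀ (grid : List (List Int)), Dom_encode_map_py grid → Spec_encode_map_py grid (encode_map_py grid)

-- ===== LEMMAS AND PROOFS =====

-- The canonical per-row value both sides are shown to equal (little-endian binary value of the row's bits).
def pvVal (row : List Int) : Int :=
  row.foldr (fun tile word => word * 2 + (if tile ≠ 0 then 1 else 0)) 0

-- OR with a fresh high bit is addition (disjoint bits).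
theorem pv_lor_pow_of_lt (c : Nat) : ∀ a : Nat, a < 2^c → a ||| 2^c = a + 2^c := by
  induction c with
  | zero => intro a h; interval_cases a; decide
  | succ c ih =>
    intro a h
    have h2 : a / 2 < 2 ^ c := by omega
    have hrec := ih (a / 2) h2
    have hbit : a ||| 2 ^ (c+1) = Nat.bit (a % 2 == 1) ((a/2) ||| 2^c) := by
      have h1 : a = Nat.bit (a % 2 == 1) (a / 2) := by
        simp [Nat.bit]; rcases Nat.mod_two_eq_zero_or_one a with hm | hm <;> simp [hm] <;> omega
      have h2' : 2 ^ (c+1) = Nat.bit false (2^c) := by simp [Nat.bit]; ring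
      conv_lhs => rw [h1, h2']
      simpa using Nat.lor_bit (a % 2 == 1) (a/2) false (2^c)
    rw [hbit, hrec]
    simp only [Nat.bit]
    rcases Nat.mod_two_eq_zero_or_one a with hm | hm <;> simp [hm] <;> · rw [pow_succ]; omega

-- A's inner fold at start column s, with a word whose set bits all lie below s,
-- equals the word plus the row's binary value shifted up by s.
theorem pv_inner_eq (row : List Int) : ∀ (s : Nat) (m : Nat), m < 2^s →
    (PySem.List.enumerate row (s : Int)).foldl
      (fun (word : Int) (p : Int × Int) =>
        if p.2 ≠ 0 then PySem.Int.bor word ((1 : Int) <<< p.1.toNat) else word)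
      (m : Int)
      = (m : Int) + pvVal row * 2^s := by
  induction row with
  | nil => intro s m _; simp [PySem.List.enumerate_nil, pvVal]
  | cons t ts ih =>
    intro s m hm
    rw [PySem.List.enumerate_cons, List.foldl_cons]
    have hcast : ((s : Int) + 1) = ((s + 1 : Nat) : Int) := by push_cast; ring
    by_cases ht : t ≠ 0
    · have hshift : ((1 : Int) <<< ((s : Int)).toNat) = ((2 ^ s : Nat) : Int) := by
        simp [Int.shiftLeft_eq]
      have hbor : (if t ≠ 0 then PySem.Int.bor (m : Int) ((1 : Int) <<< ((s : Int)).toNat)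
            else (m : Int)) = ((m + 2 ^ s : Nat) : Int) := by
        rw [if_pos ht, hshift, PySem.Int.bor_natCast, pv_lor_pow_of_lt s m hm]
      rw [show ((s : Int), t).2 = t from rfl] at *
      rw [hbor, hcast, ih (s + 1) (m + 2 ^ s) (by rw [pow_succ]; omega)]
      simp only [pvVal, List.foldr, if_pos ht]
      push_cast
      ring
    · rw [if_neg ht, hcast, ih (s + 1) m (by rw [pow_succ]; omega)]
      simp only [pvVal, List.foldr, if_neg ht]
      push_cast [pow_succ]
      ring

-- pvVal over an append: the right half's value is shifted up by the left half's length.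
theorem pvVal_append (l r : List Int) :
    pvVal (l ++ r) = pvVal l + pvVal r * 2 ^ l.length := by
  induction l with
  | nil => simp [pvVal]
  | cons t ts ih =>
    simp only [List.cons_append, pvVal, List.foldr_cons, List.length_cons] at *
    rw [ih]
    rw [pow_succ]
    ring

-- B's divide-and-conquer equals the canonical row value.
theorem pvEnc_eq (row : List Int) : pvEnc row = pvVal row := by
  fun_induction pvEnc row with
  | case1 _ _ => simp [pvVal]
  | case2 t tail _ ht h =>
      have htail : tail = [] := List.eq_nil_of_length_eq_zero (by simpa using h)
      subst htail; simp [pvVal, ht]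
  | case3 t tail _ ht h =>
      have htail : tail = [] := List.eq_nil_of_length_eq_zero (by simpa using h)
      subst htail; simp [pvVal, ht]
  | case4 r h mid ih2 ih1 =>
      rw [ih1, ih2, Int.shiftLeft_eq]
      have hv := pvVal_append (r.take (r.length / 2)) (r.drop (r.length / 2))
      rw [List.take_append_drop] at hv
      rw [hv, List.length_take, Nat.min_eq_left (by omega)]

-- ===== VERDICT (by name: the statement is the Claim_ definition above) =====
theorem encode_map_py_spec : Claim_equal_encode_map_py := by
  intro grid _
  unfold Spec_encode_map_py encode_map_py encode_map_py_alt
  rw [PySem.List.foldl_append_singleton_eq_map]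
  apply List.map_congr_left
  intro row _
  rw [pvEnc_eq]
  have h := pv_inner_eq row 0 0 (by norm_num)
  simpa using h
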